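-- pv_equiv track=rewrite | github.com/ZYuliang/algorithms_ai | algorithms_ai/deep_learning/ner_model/metrics.py | collect_seqlabel_blocks
-- ===== SOURCE A (Python) =====
-- from collections import namedtuple
--
-- SeqLabelBlock = namedtuple(
--     'SeqLabelBlock',
--     ['block_type', 'start_offset', 'end_offset']
-- )
--
-- def collect_seqlabel_blocks(labels):
--     """
--     Args:
--         labels (:obj:`List[str]`):
--             BIO sequence labels
--     Returns:
--         :obj:`List[SeqLabelBlock]`
--     """
--     blocks = []
--     start_offset, end_offset, block_type = None, None, None
--
--     for offset, lab in enumerate(labels):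
--         if lab == 'O':
--             if (block_type is not None and
--                     start_offset is not None):
--                 # last block ends
--                 end_offset = offset - 1
--                 blocks.append(
--                     SeqLabelBlock(
--                         block_type, start_offset, end_offset)
--                 )
--                 start_offset = None
--                 end_offset = None
--                 block_type = None
--         elif block_type is None:
--             # start of a block
--             block_type = lab[2:]
--             start_offset = offset
--         elif block_type != lab[2:] or \
--                 (block_type == lab[2:] and lab[0] == 'B'):
--             # last block ends and new block starts
--             end_offset = offset - 1
--             blocks.append(
--                 SeqLabelBlock(
--                     block_type, start_offset, end_offset)
--             )
--             block_type = lab[2:]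
--             start_offset = offset
--             end_offset = None
--
--     if (block_type and
--             start_offset is not None and
--             end_offset is None):
--         blocks.append(
--             SeqLabelBlock(
--                 block_type, start_offset, len(labels) - 1)
--         )
--
--     return blocks
-- ===== SOURCE B (Python) =====
-- def collect_seqlabel_blocks(labels):
--     # Pass 1: record boundary events: (offset, type) where a block starts,
--     # (offset, None) where an 'O' closes the open block.
--     events = []
--     open_type = None
--     for i, lab in enumerate(labels):
--         if lab == 'O':
--             if open_type is not None:
--                 events.append((i, None))
--                 open_type = None
--         else:
--             t = lab[2:]
--             if open_type is None or open_type != t or lab[:1] == 'B':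
--                 events.append((i, t))
--             open_type = t
--     # Pass 2: each start event ends right before the next event.
--     blocks = [(t, off, nxt - 1)
--               for (off, t), (nxt, _) in zip(events, events[1:])
--               if t is not None]
--     # A still-open final block runs to the end (empty type strings are dropped).
--     if events:
--         off, t = events[-1]
--         if t:
--             blocks.append((t, off, len(labels) - 1))
--     return blocks
-- ===== Notes on version B (the rewrite author's own statement) =====
-- stated objective: alternative
-- what changed: A builds blocks in one stateful scan that appends a finished block at every close; B first records only boundary events (block starts and closing 'O's) in one pass, then in a second pass pairs each start event with the following event to derive its end offset, handling the final still-open event separately.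
import Mathlib
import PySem

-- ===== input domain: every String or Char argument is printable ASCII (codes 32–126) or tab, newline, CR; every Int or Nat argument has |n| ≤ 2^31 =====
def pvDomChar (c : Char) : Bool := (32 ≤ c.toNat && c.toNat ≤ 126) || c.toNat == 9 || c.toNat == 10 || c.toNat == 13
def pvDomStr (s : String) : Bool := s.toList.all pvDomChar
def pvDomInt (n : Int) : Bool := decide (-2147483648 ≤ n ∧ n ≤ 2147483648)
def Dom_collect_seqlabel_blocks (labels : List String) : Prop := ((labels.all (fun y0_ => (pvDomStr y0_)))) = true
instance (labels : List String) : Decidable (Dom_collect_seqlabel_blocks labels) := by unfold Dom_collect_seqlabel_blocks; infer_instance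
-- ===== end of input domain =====

-- B collects boundary events in one pass and pairs consecutive events in a second pass
-- (different decomposition, same cost); equal to A on Pre_ (where Python A does not raise).


-- ===== PORT A =====
-- state = (blocks, start_offset, end_offset, block_type)
def pvA_step (st : List (String × Int × Int) × Option Int × Option Int × Option String)
    (p : Int × String) : List (String × Int × Int) × Option Int × Option Int × Option String :=
  match st, p with
  | (blocks, start_offset, end_offset, block_type), (offset, lab) =>
    if lab = "O" then
      match block_type, start_offset with
      | some t, some s => (blocks ++ [(t, s, offset - 1)], none, none, none)
      | _, _ => (blocks, start_offset, end_offset, block_type)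
    else
      match block_type with
      | none => (blocks, some offset, end_offset, some (PySem.Str.slice lab (some 2) none))
      | some t =>
        let tl := PySem.Str.slice lab (some 2) none
        if t ≠ tl ∨ (t = tl ∧ PySem.Str.pyGet? lab 0 = some 'B') then
          -- start_offset is always some here (Python relies on the same invariant)
          (blocks ++ [(t, start_offset.getD 0, offset - 1)], some offset, none, some tl)
        else (blocks, start_offset, end_offset, block_type)

def collect_seqlabel_blocks (labels : List String) : List (String × Int × Int) :=
  match (PySem.List.enumerate labels 0).foldl pvA_step ([], none, none, none) with
  | (blocks, some s, none, some t) =>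
      if t ≠ "" then blocks ++ [(t, s, (labels.length : Int) - 1)] else blocks
  | (blocks, _, _, _) => blocks

-- ===== PORT B =====
-- pass 1 state = (events, open_type); an event is (offset, some type) for a start, (offset, none) for a closing 'O'
def pvB_step (st : List (Int × Option String) × Option String) (p : Int × String) :
    List (Int × Option String) × Option String :=
  match st, p with
  | (events, open_type), (i, lab) =>
    if lab = "O" then
      if open_type.isSome then (events ++ [(i, none)], none) else (events, open_type)
    else
      let t := PySem.Str.slice lab (some 2) none
      if open_type = none ∨ open_type ≠ some t ∨ PySem.Str.slice lab none (some 1) = "B" then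
        (events ++ [(i, some t)], some t)
      else (events, some t)

-- pass 2: the list comprehension over zip(events, events[1:])
def pvB_pairs (events : List (Int × Option String)) : List (String × Int × Int) :=
  (events.zip (events.drop 1)).foldl
    (fun acc pq => match pq.1.2 with
      | some t => acc ++ [(t, pq.1.1, pq.2.1 - 1)]
      | none => acc) []

def collect_seqlabel_blocks_alt (labels : List String) : List (String × Int × Int) :=
  let events := ((PySem.List.enumerate labels 0).foldl pvB_step ([], none)).1
  let blocks := pvB_pairs events
  match events.getLast? with
  | some (off, some t) => if t ≠ "" then blocks ++ [(t, off, (labels.length : Int) - 1)] else blocks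
  | _ => blocks

-- ===== PRECONDITION & SPEC =====
-- Pre_ excludes exactly the inputs on which Python A raises IndexError (evaluating lab[0]):
-- an empty-string label right after a non-'O' label whose type slice lab[2:] is empty
-- (i.e. an empty label while a block of empty type is open). B returns normally there.
def Pre_collect_seqlabel_blocks (labels : List String) : Prop :=
  ∀ p ∈ labels.zip (labels.drop 1), p.2 = "" → p.1 = "O" ∨ PySem.Str.slice p.1 (some 2) none ≠ ""
instance (labels : List String) : Decidable (Pre_collect_seqlabel_blocks labels) := by
  unfold Pre_collect_seqlabel_blocks; infer_instance
def pvWitness_collect_seqlabel_blocks : List String := ["B-x", "I-x", "O", "B-y"]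

def Spec_collect_seqlabel_blocks (labels : List String) (out : List (String × Int × Int)) : Prop := out = collect_seqlabel_blocks_alt labels
instance (labels : List String) (out : List (String × Int × Int)) : Decidable (Spec_collect_seqlabel_blocks labels out) := by unfold Spec_collect_seqlabel_blocks; infer_instance

-- ===== CLAIM (what is proved, stated in full; the proofs are below) =====
def Claim_equal_collect_seqlabel_blocks : Prop := ∀ (labels : List String), Dom_collect_seqlabel_blocks labels → Pre_collect_seqlabel_blocks labels → Spec_collect_seqlabel_blocks labels (collect_seqlabel_blocks labels)
-- ===== LEMMAS AND PROOFS =====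

-- zip of a list with its own tail, after appending one element
lemma pv_zip_tail_append {α : Type} (ev : List α) (e : α) (h : ev ≠ []) :
    (ev ++ [e]).zip ((ev ++ [e]).drop 1) = ev.zip (ev.drop 1) ++ [(ev.getLast h, e)] := by
  induction ev with
  | nil => exact absurd rfl h
  | cons a l ih =>
    cases l with
    | nil => simp
    | cons b r =>
      have h2 : (b :: r : List α) ≠ [] := by simp
      have hrec := ih h2
      simp only [List.drop_one, List.tail_cons, List.cons_append, List.zip_cons_cons] at hrec ⊢
      rw [hrec]
      simp [List.getLast]

lemma pv_pairs_append (ev : List (Int × Option String)) (e : Int × Option String) :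
    pvB_pairs (ev ++ [e]) = pvB_pairs ev ++
      (match ev.getLast? with
       | some (s, some t) => [(t, s, e.1 - 1)]
       | _ => []) := by
  cases hev : ev.getLast? with
  | none =>
    have h0 : ev = [] := List.getLast?_eq_none_iff.mp hev
    subst h0; simp [pvB_pairs]
  | some q =>
    have hne : ev ≠ [] := by intro h0; rw [h0] at hev; simp at hev
    have hq : ev.getLast hne = q := by
      rw [List.getLast?_eq_some_getLast hne] at hev
      exact (Option.some_inj.mp hev)
    unfold pvB_pairs
    rw [pv_zip_tail_append ev e hne, List.foldl_append, hq]
    rcases q with ⟨s, t⟩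
    cases t <;> simp

-- head test: lab[0] == 'B' agrees with lab[:1] == "B"
lemma pv_head_test (lab : String) :
    (PySem.Str.pyGet? lab 0 = some 'B') ↔ (PySem.Str.slice lab none (some 1) = "B") := by
  have hg : PySem.Str.pyGet? lab 0 = PySem.List.pyGet? lab.toList 0 := by
    simp [PySem.Str.pyGet?]
  rcases hc : lab.toList with _ | ⟨c, cs⟩
  · have hs : PySem.Str.slice lab none (some 1) = "" := by
      simp [PySem.Str.slice, PySem.List.slice, hc]
    rw [hg, hc, hs, PySem.List.pyGet?_zero]
    constructor
    · intro h; simp at h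
    · intro h; exact absurd h (by decide)
  · have hs : PySem.Str.slice lab none (some 1) = String.ofList [c] := by
      simp [PySem.Str.slice, PySem.List.slice, hc]
    rw [hg, hc, hs, PySem.List.pyGet?_zero_cons]
    constructor
    · intro h
      rw [Option.some_inj.mp h]
    · intro h
      have h2 : ([c] : List Char) = ("B" : String).toList := by rw [← h]; simp
      rw [show ("B" : String).toList = ['B'] from rfl] at h2
      exact congrArg some (List.head_eq_of_cons_eq h2)

-- the invariant tying A's fold state to B's fold state
def pvInv (ast : List (String × Int × Int) × Option Int × Option Int × Option String)
    (bst : List (Int × Option String) × Option String) : Prop :=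
  match ast, bst with
  | (bl, so, eo, bt), (ev, ot) =>
    eo = none ∧ bt = ot ∧ bl = pvB_pairs ev ∧
    (match bt with
     | none => (match ev.getLast? with
                | some (_, some _) => False
                | _ => True)
     | some t => ∃ s, so = some s ∧ ev.getLast? = some (s, some t))

lemma pv_step_inv (ast : List (String × Int × Int) × Option Int × Option Int × Option String)
    (bst : List (Int × Option String) × Option String) (p : Int × String)
    (h : pvInv ast bst) : pvInv (pvA_step ast p) (pvB_step bst p) := by
  obtain ⟨bl, so, eo, bt⟩ := ast
  obtain ⟨ev, ot⟩ := bst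
  obtain ⟨i, lab⟩ := p
  obtain ⟨heo, hbt, hbl, hrest⟩ := h
  subst heo hbt hbl
  by_cases hO : lab = "O"
  · cases hbtc : bt with
    | none =>
      simp only [pvA_step, pvB_step, hO, if_true, hbtc, Option.isSome_none] at *
      exact ⟨rfl, rfl, rfl, by simpa [hbtc] using hrest⟩
    | some t =>
      rw [hbtc] at hrest
      obtain ⟨s, hso, hlast⟩ := hrest
      have hne : ev ≠ [] := by intro h0; rw [h0] at hlast; simp at hlast
      simp only [pvA_step, pvB_step, hO, if_true, hso, Option.isSome_some]
      refine ⟨rfl, rfl, ?_, ?_⟩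
      · rw [pv_pairs_append, hlast]
      · simp
  · cases hbtc : bt with
    | none =>
      simp only [pvA_step, pvB_step, hO, if_false]
      rw [hbtc] at hrest
      simp only [true_or, if_true]
      refine ⟨rfl, rfl, ?_, ?_⟩
      · rw [pv_pairs_append]
        cases hlast : ev.getLast? with
        | none => simp
        | some q =>
          rcases q with ⟨s, t'⟩
          cases t' with
          | none => simp
          | some u => rw [hlast] at hrest; simp at hrest
      · exact ⟨i, rfl, by simp⟩
    | some t0 =>
      rw [hbtc] at hrest
      obtain ⟨s, hso, hlast⟩ := hrest
      have hne : ev ≠ [] := by intro h0; rw [h0] at hlast; simp at hlast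
      -- the two branch conditions agree
      have hcond : (t0 ≠ PySem.Str.slice lab (some 2) none ∨
            (t0 = PySem.Str.slice lab (some 2) none ∧ PySem.Str.pyGet? lab 0 = some 'B')) ↔
          (some t0 = none ∨ some t0 ≠ some (PySem.Str.slice lab (some 2) none) ∨
            PySem.Str.slice lab none (some 1) = "B") := by
        constructor
        · rintro (h | ⟨he, hB⟩)
          · exact Or.inr (Or.inl (by simpa using h))
          · exact Or.inr (Or.inr ((pv_head_test lab).mp hB))
        · rintro (h | h | hB)
          · simp at h
          · exact Or.inl (by simpa using h)
          · by_cases he : t0 = PySem.Str.slice lab (some 2) none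
            · exact Or.inr ⟨he, (pv_head_test lab).mpr hB⟩
            · exact Or.inl he
      simp only [pvA_step, pvB_step, if_neg hO, hso]
      by_cases hc : t0 ≠ PySem.Str.slice lab (some 2) none ∨
          (t0 = PySem.Str.slice lab (some 2) none ∧ PySem.Str.pyGet? lab 0 = some 'B')
      · rw [if_pos hc, if_pos (hcond.mp hc)]
        refine ⟨rfl, rfl, ?_, ⟨i, rfl, by simp⟩⟩
        rw [pv_pairs_append, hlast]
        simp
      · rw [if_neg hc, if_neg (fun h' => hc (hcond.mpr h'))]
        have ht0 : t0 = PySem.Str.slice lab (some 2) none := by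
          by_contra hne'; exact hc (Or.inl hne')
        exact ⟨rfl, congrArg some ht0, rfl, ⟨s, rfl, by rw [hlast, ht0]⟩⟩

lemma pv_fold_inv (l : List (Int × String))
    (ast : List (String × Int × Int) × Option Int × Option Int × Option String)
    (bst : List (Int × Option String) × Option String) (h : pvInv ast bst) :
    pvInv (l.foldl pvA_step ast) (l.foldl pvB_step bst) := by
  induction l generalizing ast bst with
  | nil => exact h
  | cons p r ih => exact ih _ _ (pv_step_inv ast bst p h)

-- ===== VERDICT (by name: the statement is the Claim_ definition above) =====
theorem collect_seqlabel_blocks_spec : Claim_equal_collect_seqlabel_blocks := by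
  intro labels _ _
  unfold Spec_collect_seqlabel_blocks collect_seqlabel_blocks collect_seqlabel_blocks_alt
  have h := pv_fold_inv (PySem.List.enumerate labels 0) ([], none, none, none) ([], none)
    ⟨rfl, rfl, rfl, by simp⟩
  set ast := (PySem.List.enumerate labels 0).foldl pvA_step ([], none, none, none) with hA
  set bst := (PySem.List.enumerate labels 0).foldl pvB_step ([], none) with hB
  obtain ⟨bl, so, eo, bt⟩ := ast
  obtain ⟨ev, ot⟩ := bst
  obtain ⟨heo, hbt, hbl, hrest⟩ := h
  subst heo hbt hbl
  cases hbtc : bt with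
  | none =>
    rw [hbtc] at hrest
    cases hlast : ev.getLast? with
    | none => simp [hlast]
    | some q =>
      rcases q with ⟨s, t'⟩
      cases t' with
      | none => simp [hlast]
      | some u => rw [hlast] at hrest; simp at hrest
  | some t =>
    rw [hbtc] at hrest
    obtain ⟨s, hso, hlast⟩ := hrest
    rw [hso]
    simp [hlast]
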